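-- pv_equiv track=rewrite | github.com/Aethvion/Misaka-Cipher | core/companions/engine/tools.py | parse_tool_blocks
-- ===== SOURCE A (Python) =====
-- def parse_tool_blocks(text: str) -> list[tuple[int, int, str]]:
--     """Return list of (start, end, raw_block) for every [tool:...] block in text."""
--     blocks: list[tuple[int, int, str]] = []
--     idx = text.find("[tool:")
--     while idx != -1:
--         depth = 0
--         end_idx = len(text)
--         for i in range(idx, len(text)):
--             if text[i] == "[":
--                 depth += 1
--             elif text[i] == "]":
--                 depth -= 1
--                 if depth == 0:
--                     end_idx = i + 1
--                     break
--         blocks.append((idx, end_idx, text[idx:end_idx]))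
--         idx = text.find("[tool:", end_idx)
--     return blocks
-- ===== SOURCE B (Python) =====
-- def parse_tool_blocks(text: str) -> list[tuple[int, int, str]]:
--     """Single linear pass with a state machine instead of repeated str.find + inner rescans."""
--     blocks: list[tuple[int, int, str]] = []
--     n = len(text)
--     in_block = False
--     start = 0
--     depth = 0
--     for i in range(n):
--         if not in_block:
--             if text[i:i + 6] == "[tool:":
--                 in_block = True
--                 start = i
--                 depth = 1
--         else:
--             c = text[i]
--             if c == "[":
--                 depth += 1
--             elif c == "]":
--                 depth -= 1
--                 if depth == 0:
--                     blocks.append((start, i + 1, text[start:i + 1]))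
--                     in_block = False
--     if in_block:
--         blocks.append((start, n, text[start:]))
--     return blocks
-- ===== Notes on version B (the rewrite author's own statement) =====
-- stated objective: alternative
-- what changed: Replaced the outer str.find loop with a restarted inner depth scan by one linear left-to-right state machine (in_block flag, start index, depth counter) over the characters, emitting each block the moment its depth returns to zero and flushing an unclosed block after the loop.
import Mathlib
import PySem

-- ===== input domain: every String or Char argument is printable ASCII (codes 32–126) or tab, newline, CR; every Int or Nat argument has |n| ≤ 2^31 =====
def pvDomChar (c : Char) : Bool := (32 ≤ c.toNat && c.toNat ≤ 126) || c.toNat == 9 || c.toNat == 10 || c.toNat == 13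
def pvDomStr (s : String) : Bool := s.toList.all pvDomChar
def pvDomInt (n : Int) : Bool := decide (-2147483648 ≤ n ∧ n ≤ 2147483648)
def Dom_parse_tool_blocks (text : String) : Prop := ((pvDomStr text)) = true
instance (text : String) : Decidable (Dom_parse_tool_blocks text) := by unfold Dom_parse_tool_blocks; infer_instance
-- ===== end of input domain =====

-- B replaces A's outer str.find loop with restarted inner depth scans by one linear
-- left-to-right state machine over the characters (objective: alternative decomposition).

-- ===== PORT A =====

-- the search pattern "[tool:" as a char list (shared constant of both ports)
def pvToolPat : List Char := ['[', 't', 'o', 'o', 'l', ':']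

-- A's inner `for i in range(idx, len(text))` loop: scan the suffix, absolute index i,
-- running depth; `some (i+1)` is the `break` with end_idx = i+1, `none` means the loop
-- ran out (end_idx stays len(text)).
def pvScanA : List Char → Nat → Int → Option Nat
  | [], _, _ => none
  | c :: rest, i, depth =>
    if c = '[' then pvScanA rest (i + 1) (depth + 1)
    else if c = ']' then
      if depth - 1 = 0 then some (i + 1) else pvScanA rest (i + 1) (depth - 1)
    else pvScanA rest (i + 1) depth

-- end_idx computed by A's inner loop when started at index j
def pvEnd (cs : List Char) (j : Nat) : Nat := (pvScanA (List.drop j cs) j 0).getD cs.length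

-- termination facts for the outer while loop (cited by pvALoop's decreasing_by)
theorem pvScanA_bounds : ∀ (suf : List Char) (i : Nat) (d : Int) (e : Nat),
    pvScanA suf i d = some e → i < e ∧ e ≤ i + suf.length := by
  intro suf
  induction suf with
  | nil => intro i d e h; simp [pvScanA] at h
  | cons c rest ih =>
    intro i d e h
    have hlc : (c :: rest).length = rest.length + 1 := rfl
    simp only [pvScanA] at h
    split_ifs at h with h1 h2 h3
    · have := ih _ _ _ h; omega
    · simp at h; omega
    · have := ih _ _ _ h; omega
    · have := ih _ _ _ h; omega

theorem pvEnd_bounds (cs : List Char) (j : Nat) (hj : j < cs.length) :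
    j < pvEnd cs j ∧ pvEnd cs j ≤ cs.length := by
  unfold pvEnd
  cases hs : pvScanA (List.drop j cs) j 0 with
  | none => simp; omega
  | some e =>
    have h := pvScanA_bounds _ _ _ _ hs
    simp only [List.length_drop] at h
    simp; omega

-- CPython quirk (kept by PySem.Chars.findFrom): a start past len(s) finds nothing
theorem pvFindFrom_past (cs sub : List Char) (k : Int) (h : (cs.length : Int) < k) :
    PySem.Chars.findFrom cs sub k none = -1 := by
  have hk : ¬ k < 0 := by omega
  simp [PySem.Chars.findFrom, hk, h]

theorem pvFindFacts (cs : List Char) (start : Nat)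
    (h : PySem.Chars.findFrom cs pvToolPat (start : Int) ≠ -1) :
    start ≤ cs.length ∧
    start ≤ (PySem.Chars.findFrom cs pvToolPat (start : Int)).toNat ∧
    (PySem.Chars.findFrom cs pvToolPat (start : Int)).toNat < cs.length ∧
    pvToolPat <+: List.drop (PySem.Chars.findFrom cs pvToolPat (start : Int)).toNat cs ∧
    (∀ m : Nat, start ≤ m → m < (PySem.Chars.findFrom cs pvToolPat (start : Int)).toNat →
      ¬ pvToolPat <+: List.drop m cs) := by
  have hsn : start ≤ cs.length := by
    by_contra hgt
    exact h (pvFindFrom_past cs pvToolPat start (by omega))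
  obtain ⟨h1, h2, h3⟩ := PySem.Chars.findFrom_natCast_spec cs pvToolPat start hsn h
  refine ⟨hsn, by omega, ?_, h2, h3⟩
  by_contra hge
  have : List.drop (PySem.Chars.findFrom cs pvToolPat (start : Int)).toNat cs = [] :=
    List.drop_eq_nil_of_le (by omega)
  rw [this] at h2
  simp [pvToolPat, List.prefix_nil] at h2

-- A's outer `while idx != -1` loop; `start` is the search start (0, then each end_idx).
-- (The first Python call is text.find("[tool:") = text.find("[tool:", 0).)
-- the (start, end_idx, text[idx:end_idx]) triple A appends for the block found at j
def pvABlk (cs : List Char) (j : Nat) : Int × Int × String :=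
  ((j : Int), (pvEnd cs j : Int),
    String.ofList (PySem.List.slice cs (some (j : Int)) (some (pvEnd cs j : Int))))

def pvALoop (cs : List Char) (start : Nat) : List (Int × Int × String) :=
  if h : PySem.Chars.findFrom cs pvToolPat (start : Int) = -1 then []
  else
    pvABlk cs (PySem.Chars.findFrom cs pvToolPat (start : Int)).toNat ::
      pvALoop cs (pvEnd cs (PySem.Chars.findFrom cs pvToolPat (start : Int)).toNat)
termination_by cs.length - start
decreasing_by
  obtain ⟨hsn, hsj, hjn, -, -⟩ := pvFindFacts cs start h
  obtain ⟨he1, he2⟩ := pvEnd_bounds cs _ hjn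
  omega

def parse_tool_blocks (text : String) : List (Int × Int × String) :=
  pvALoop text.toList 0

-- ===== PORT B =====

-- one step of B's `for i in range(n)` loop; state = (blocks, in_block, start, depth)
def pvBStep (cs : List Char) :
    (List (Int × Int × String) × Bool × Int × Int) → Int →
    (List (Int × Int × String) × Bool × Int × Int)
  | (blocks, inb, start, depth), i =>
    if inb = false then
      if PySem.List.slice cs (some i) (some (i + 6)) = pvToolPat then (blocks, true, i, 1)
      else (blocks, inb, start, depth)
    else
      match PySem.List.pyGet? cs i with
      | some c =>
        if c = '[' then (blocks, true, start, depth + 1)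
        else if c = ']' then
          if depth - 1 = 0 then
            (blocks ++ [(start, i + 1,
               String.ofList (PySem.List.slice cs (some start) (some (i + 1))))], false, start, depth - 1)
          else (blocks, true, start, depth - 1)
        else (blocks, inb, start, depth)
      | none => (blocks, inb, start, depth)   -- unreachable: i ∈ range(len(text))

def parse_tool_blocks_alt (text : String) : List (Int × Int × String) :=
  let cs := text.toList
  let st := (PySem.List.pyRange 0 (cs.length : Int)).foldl (pvBStep cs) ([], false, 0, 0)
  if st.2.1 then
    st.1 ++ [(st.2.2.1, (cs.length : Int), String.ofList (PySem.List.slice cs (some st.2.2.1) none))]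
  else st.1

-- ===== PRECONDITION & SPEC =====
def Spec_parse_tool_blocks (text : String) (out : List (Int × Int × String)) : Prop := out = parse_tool_blocks_alt text
instance (text : String) (out : List (Int × Int × String)) : Decidable (Spec_parse_tool_blocks text out) := by unfold Spec_parse_tool_blocks; infer_instance

-- ===== CLAIM (what is proved, stated in full; the proofs are below) =====
def Claim_equal_parse_tool_blocks : Prop := ∀ (text : String), Dom_parse_tool_blocks text → Spec_parse_tool_blocks text (parse_tool_blocks text)

-- ===== LEMMAS AND PROOFS =====

-- the common reference state machine both ports are reduced to
mutual
def pvOut (cs : List Char) (i : Nat) : List (Int × Int × String) :=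
  if h : i < cs.length then
    if PySem.List.slice cs (some (i : Int)) (some ((i : Int) + 6)) = pvToolPat then
      pvIn cs (i : Int) 1 (i + 1)
    else pvOut cs (i + 1)
  else []
termination_by cs.length - i

def pvIn (cs : List Char) (start depth : Int) (i : Nat) : List (Int × Int × String) :=
  if h : i < cs.length then
    if cs[i] = '[' then pvIn cs start (depth + 1) (i + 1)
    else if cs[i] = ']' then
      if depth - 1 = 0 then
        (start, (i : Int) + 1,
          String.ofList (PySem.List.slice cs (some start) (some ((i : Int) + 1)))) :: pvOut cs (i + 1)
      else pvIn cs start (depth - 1) (i + 1)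
    else pvIn cs start depth (i + 1)
  else [(start, (cs.length : Int), String.ofList (PySem.List.slice cs (some start) none))]
termination_by cs.length - i
end

theorem pvSlice_eq_pat_iff (cs : List Char) (i : Nat) :
    (PySem.List.slice cs (some (i : Int)) (some ((i : Int) + 6)) = pvToolPat) ↔
      pvToolPat <+: List.drop i cs := by
  have h6 : ((i : Int) + 6) = ((i + 6 : Nat) : Int) := by push_cast; ring
  rw [h6, PySem.List.slice_natCast, List.prefix_iff_eq_take,
    show i + 6 - i = 6 from by omega, show pvToolPat.length = 6 from rfl]
  exact eq_comm

-- what pvIn computes, phrased through A's inner scan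
def pvInSpec (cs : List Char) (s : Int) : Option Nat → List (Int × Int × String)
  | some e => (s, (e : Int), String.ofList (PySem.List.slice cs (some s) (some (e : Int)))) :: pvOut cs e
  | none => [(s, (cs.length : Int), String.ofList (PySem.List.slice cs (some s) none))]

theorem pvIn_eq_spec (cs : List Char) (i : Nat) (s d : Int) :
    pvIn cs s d i = pvInSpec cs s (pvScanA (List.drop i cs) i d) := by
  suffices h : ∀ (k i : Nat) (s d : Int), cs.length - i = k →
      pvIn cs s d i = pvInSpec cs s (pvScanA (List.drop i cs) i d) from h _ i s d rfl
  intro k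
  induction k with
  | zero =>
    intro i s d hk
    rw [List.drop_eq_nil_of_le (by omega), pvIn, dif_neg (by omega)]
    rfl
  | succ k ih =>
    intro i s d hk
    have hlt : i < cs.length := by omega
    have hdrop : List.drop i cs = cs[i] :: List.drop (i + 1) cs := List.drop_eq_getElem_cons hlt
    rw [pvIn, dif_pos hlt, hdrop]
    simp only [pvScanA]
    by_cases h1 : cs[i] = '['
    · rw [if_pos h1, if_pos h1]; exact ih (i + 1) s (d + 1) (by omega)
    · rw [if_neg h1, if_neg h1]
      by_cases h2 : cs[i] = ']'
      · rw [if_pos h2, if_pos h2]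
        by_cases h3 : d - 1 = 0
        · rw [if_pos h3, if_pos h3]
          simp [pvInSpec]
        · rw [if_neg h3, if_neg h3]; exact ih (i + 1) s (d - 1) (by omega)
      · rw [if_neg h2, if_neg h2]; exact ih (i + 1) s d (by omega)

theorem pvOut_noMatch (cs : List Char) (i : Nat)
    (h : ∀ j, i ≤ j → ¬ pvToolPat <+: List.drop j cs) : pvOut cs i = [] := by
  suffices hs : ∀ (k i : Nat), cs.length - i = k →
      (∀ j, i ≤ j → ¬ pvToolPat <+: List.drop j cs) → pvOut cs i = [] from hs _ i rfl h
  intro k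
  induction k with
  | zero => intro i hk _; rw [pvOut, dif_neg (by omega)]
  | succ k ih =>
    intro i hk h
    rw [pvOut, dif_pos (show i < cs.length by omega),
      if_neg (fun hc => h i le_rfl ((pvSlice_eq_pat_iff cs i).mp hc))]
    exact ih (i + 1) (by omega) (fun j hj => h j (by omega))

theorem pvOut_skip (cs : List Char) (i j : Nat) (hij : i ≤ j) (hjn : j ≤ cs.length)
    (h : ∀ m, i ≤ m → m < j → ¬ pvToolPat <+: List.drop m cs) : pvOut cs i = pvOut cs j := by
  suffices hs : ∀ (k i : Nat), j - i = k → i ≤ j →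
      (∀ m, i ≤ m → m < j → ¬ pvToolPat <+: List.drop m cs) → pvOut cs i = pvOut cs j from
    hs _ i rfl hij h
  intro k
  induction k with
  | zero => intro i hk hij' _; rw [show i = j from by omega]
  | succ k ih =>
    intro i hk hij' h
    rw [pvOut, dif_pos (show i < cs.length by omega),
      if_neg (fun hc => h i le_rfl (by omega) ((pvSlice_eq_pat_iff cs i).mp hc))]
    exact ih (i + 1) (by omega) (by omega) (fun m hm hmj => h m (by omega) hmj)

theorem pvALoop_eq_pvOut (cs : List Char) (i : Nat) (hi : i ≤ cs.length) :
    pvALoop cs i = pvOut cs i := by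
  suffices hs : ∀ (k i : Nat), i ≤ cs.length → cs.length - i = k → pvALoop cs i = pvOut cs i from
    hs _ i hi rfl
  intro k
  induction k using Nat.strong_induction_on with
  | _ k IH =>
    intro i hi hk
    rw [pvALoop]
    by_cases h : PySem.Chars.findFrom cs pvToolPat (i : Int) = -1
    · rw [dif_pos h]
      refine (pvOut_noMatch cs i ?_).symm
      have hiff := (PySem.Chars.findFrom_natCast_eq_neg_one_iff cs pvToolPat i hi).mp h
      intro j hj hpre
      apply hiff
      have hd : List.drop j cs = List.drop (j - i) (List.drop i cs) := by
        rw [List.drop_drop]; congr 1; omega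
      rw [hd] at hpre
      exact hpre.isInfix.trans (List.drop_suffix _ _).isInfix
    · rw [dif_neg h]
      obtain ⟨-, hij, hjn, hpre, hmin⟩ := pvFindFacts cs i h
      set j := (PySem.Chars.findFrom cs pvToolPat (i : Int)).toNat with hjdef
      rw [pvOut_skip cs i j hij (by omega) hmin,
        pvOut, dif_pos hjn, if_pos ((pvSlice_eq_pat_iff cs j).mpr hpre)]
      have hdrop : List.drop j cs = cs[j] :: List.drop (j + 1) cs := List.drop_eq_getElem_cons hjn
      have hbr : cs[j] = '[' := by
        obtain ⟨t, ht⟩ := hpre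
        rw [hdrop] at ht
        simp only [pvToolPat, List.cons_append, List.cons.injEq] at ht
        exact ht.1.symm
      have hscan : pvScanA (List.drop j cs) j 0 = pvScanA (List.drop (j + 1) cs) (j + 1) 1 := by
        rw [hdrop]; simp [pvScanA, hbr]
      rw [pvIn_eq_spec cs (j + 1) (j : Int) 1]
      cases hs : pvScanA (List.drop (j + 1) cs) (j + 1) 1 with
      | some e =>
        have hb := pvScanA_bounds _ _ _ _ hs
        simp only [List.length_drop] at hb
        have he : pvEnd cs j = e := by unfold pvEnd; rw [hscan, hs]; rfl
        have hrec := IH (cs.length - e) (by omega) e (by omega) rfl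
        simp only [pvInSpec, pvABlk, he, hrec]
      | none =>
        have he : pvEnd cs j = cs.length := by unfold pvEnd; rw [hscan, hs]; rfl
        have hrec := IH (cs.length - cs.length) (by omega) cs.length le_rfl rfl
        have hsl : PySem.List.slice cs (some (j : Int)) (some (cs.length : Int)) =
            PySem.List.slice cs (some (j : Int)) none := by
          rw [PySem.List.slice_natCast, PySem.List.slice_from_natCast]
          exact List.take_of_length_le (by simp)
        simp only [pvInSpec, pvABlk, he, hrec, hsl]
        rw [pvOut, dif_neg (lt_irrefl _)]

def pvFinish (cs : List Char) (st : List (Int × Int × String) × Bool × Int × Int) :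
    List (Int × Int × String) :=
  if st.2.1 then
    st.1 ++ [(st.2.2.1, (cs.length : Int), String.ofList (PySem.List.slice cs (some st.2.2.1) none))]
  else st.1

theorem pvFoldB (cs : List Char) : ∀ (k i : Nat), cs.length - i = k →
    ∀ (bs : List (Int × Int × String)) (inb : Bool) (s d : Int),
    pvFinish cs ((PySem.List.pyRange (i : Int) (cs.length : Int)).foldl (pvBStep cs) (bs, inb, s, d)) =
      bs ++ (if inb then pvIn cs s d i else pvOut cs i) := by
  intro k
  induction k with
  | zero =>
    intro i hk bs inb s d
    rw [PySem.List.pyRange_one_eq_nil (by exact_mod_cast Nat.le_of_sub_eq_zero hk)]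
    cases inb with
    | false => simp [pvFinish, pvOut, show ¬ i < cs.length from by omega]
    | true => simp [pvFinish, pvIn, show ¬ i < cs.length from by omega]
  | succ k ih =>
    intro i hk bs inb s d
    have hlt : i < cs.length := by omega
    rw [PySem.List.pyRange_one_cons (by exact_mod_cast hlt), List.foldl_cons,
      show (i : Int) + 1 = ((i + 1 : Nat) : Int) from by push_cast; ring]
    cases inb with
    | false =>
      by_cases hc : PySem.List.slice cs (some (i : Int)) (some ((i : Int) + 6)) = pvToolPat
      · rw [show pvBStep cs (bs, false, s, d) (i : Int) = (bs, true, (i : Int), 1) from by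
          simp [pvBStep, hc]]
        have hih := ih (i + 1) (by omega) bs true (i : Int) 1
        rw [if_pos rfl] at hih
        conv_rhs => rw [if_neg Bool.false_ne_true, pvOut, dif_pos hlt, if_pos hc]
        exact hih
      · rw [show pvBStep cs (bs, false, s, d) (i : Int) = (bs, false, s, d) from by
          simp [pvBStep, hc]]
        have hih := ih (i + 1) (by omega) bs false s d
        rw [if_neg Bool.false_ne_true] at hih
        conv_rhs => rw [if_neg Bool.false_ne_true, pvOut, dif_pos hlt, if_neg hc]
        exact hih
    | true =>
      have hget : PySem.List.pyGet? cs (i : Int) = some cs[i] := by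
        simp [PySem.List.pyGet?_natCast, List.getElem?_eq_getElem hlt]
      by_cases h1 : cs[i] = '['
      · rw [show pvBStep cs (bs, true, s, d) (i : Int) = (bs, true, s, d + 1) from by
          simp [pvBStep, hget, h1]]
        have hih := ih (i + 1) (by omega) bs true s (d + 1)
        rw [if_pos rfl] at hih
        conv_rhs => rw [if_pos rfl, pvIn, dif_pos hlt, if_pos h1]
        exact hih
      · by_cases h2 : cs[i] = ']'
        · by_cases h3 : d - 1 = 0
          · rw [show pvBStep cs (bs, true, s, d) (i : Int) =
                (bs ++ [(s, (i : Int) + 1,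
                  String.ofList (PySem.List.slice cs (some s) (some ((i : Int) + 1))))],
                 false, s, d - 1) from by simp [pvBStep, hget, h2, h3]]
            have hih := ih (i + 1) (by omega)
              (bs ++ [(s, (i : Int) + 1,
                String.ofList (PySem.List.slice cs (some s) (some ((i : Int) + 1))))])
              false s (d - 1)
            rw [if_neg Bool.false_ne_true, List.append_assoc, List.singleton_append] at hih
            conv_rhs => rw [if_pos rfl, pvIn, dif_pos hlt, if_neg h1, if_pos h2, if_pos h3]
            exact hih
          · rw [show pvBStep cs (bs, true, s, d) (i : Int) = (bs, true, s, d - 1) from by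
              simp [pvBStep, hget, h2, h3]]
            have hih := ih (i + 1) (by omega) bs true s (d - 1)
            rw [if_pos rfl] at hih
            conv_rhs => rw [if_pos rfl, pvIn, dif_pos hlt, if_neg h1, if_pos h2, if_neg h3]
            exact hih
        · rw [show pvBStep cs (bs, true, s, d) (i : Int) = (bs, true, s, d) from by
            simp [pvBStep, hget, h1, h2]]
          have hih := ih (i + 1) (by omega) bs true s d
          rw [if_pos rfl] at hih
          conv_rhs => rw [if_pos rfl, pvIn, dif_pos hlt, if_neg h1, if_neg h2]
          exact hih

-- ===== VERDICT (by name: the statement is the Claim_ definition above) =====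
theorem parse_tool_blocks_spec : Claim_equal_parse_tool_blocks := by
  intro text _
  unfold Spec_parse_tool_blocks parse_tool_blocks parse_tool_blocks_alt
  have hA := pvALoop_eq_pvOut text.toList 0 (by omega)
  have hB := pvFoldB text.toList text.toList.length 0 (by omega) [] false 0 0
  simp only [Nat.cast_zero] at hB
  rw [hA]
  simp only [pvFinish] at hB
  simpa using hB.symm
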